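-- pv_equiv track=rewrite | github.com/parelkobra/cs50x | pset6/dna/dna.py | get_repeats
-- ===== SOURCE A (Python) =====
-- def get_repeats(db, seq):
--     repeats = list()
--
--     keys = iter(db[0].keys())
--     next(keys)
--
--     for STR in keys:
--         i, max_repeat, cur_repeat = 0, 0, 0
--         while i < len(seq):
--             cur_repeat = 0
--             if seq.endswith(STR, i, len(STR) + i):
--                 cur_repeat = 1
--                 i += len(STR)
--                 while seq.endswith(STR, i, len(STR) + i):
--                     cur_repeat += 1
--                     i += len(STR)
--                 if max_repeat < cur_repeat:
--                     max_repeat = cur_repeat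
--             else:
--                 i += 1
--         repeats.append(max_repeat)
--
--     return repeats
-- ===== SOURCE B (Python) =====
-- def _longest_empty_run(parts):
--     # length of the longest run of consecutive "" in parts, by counting the
--     # leading run and recursing past the first non-empty piece
--     if not parts:
--         return 0
--     e = 0
--     while e < len(parts) and parts[e] == "":
--         e += 1
--     return max(e, _longest_empty_run(parts[e + 1:]))
--
--
-- def get_repeats(db, seq):
--     res = []
--     for STR in list(db[0])[1:]:
--         parts = seq.split(STR)
--         res.append(0 if len(parts) == 1 else _longest_empty_run(parts[1:-1]) + 1)
--     return res
-- ===== Notes on version B (the rewrite author's own statement) =====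
-- stated objective: faster
-- what changed: B replaces A's per-position endswith counting scan with seq.split(STR): the answer is 1 + the longest run of consecutive empty interior fragments of the split (0 if the STR never occurs), computed by a recursive leading-run count; the header key is dropped by slicing the key list instead of next(iter(...)).
-- outside the precondition, e.g. on get_repeats([{'name': 'x', '': 'y'}], ''): A returns [0], B raises ValueError
import Mathlib
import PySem

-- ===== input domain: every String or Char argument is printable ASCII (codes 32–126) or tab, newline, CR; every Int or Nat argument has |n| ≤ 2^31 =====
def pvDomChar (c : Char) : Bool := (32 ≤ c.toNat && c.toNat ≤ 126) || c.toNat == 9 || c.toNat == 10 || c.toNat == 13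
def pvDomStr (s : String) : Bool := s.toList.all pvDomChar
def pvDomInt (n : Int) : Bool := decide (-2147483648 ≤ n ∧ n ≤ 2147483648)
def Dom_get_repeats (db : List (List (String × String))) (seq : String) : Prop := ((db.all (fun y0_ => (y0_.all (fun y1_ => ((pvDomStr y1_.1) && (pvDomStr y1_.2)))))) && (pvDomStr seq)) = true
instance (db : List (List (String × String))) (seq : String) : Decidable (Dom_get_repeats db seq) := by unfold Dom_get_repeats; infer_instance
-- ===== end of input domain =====

-- B replaces A's per-position endswith counting scan by splitting the sequence on the STR and
-- measuring the longest run of consecutive empty interior fragments (+1); measured faster by a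
-- constant factor.

-- ===== PORT A =====
-- seq.endswith(STR, i, len(STR) + i) : endswith with slice bounds = endswith of the slice (exact)
def pvEndsAt (s t : List Char) (i : Nat) : Bool :=
  PySem.Chars.endswith (PySem.List.slice s (some (i : Int)) (some ((t.length + i : Nat) : Int))) t

-- the inner 'while seq.endswith(...): cur_repeat += 1; i += len(STR)' loop; fuel makes it total
-- (fuel s.length+1 is never exhausted on inputs admitted by Pre_)
def pvInnerA (s t : List Char) : Nat → Nat → Int → Nat × Int
  | 0, i, cur => (i, cur)
  | f + 1, i, cur => if pvEndsAt s t i then pvInnerA s t f (i + t.length) (cur + 1) else (i, cur)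

-- the outer 'while i < len(seq)' loop of A
def pvOuterA (s t : List Char) : Nat → Nat → Int → Int
  | 0, _, mx => mx
  | f + 1, i, mx =>
    if i < s.length then
      if pvEndsAt s t i then
        let p := pvInnerA s t (s.length + 1) (i + t.length) 1
        pvOuterA s t f p.1 (if mx < p.2 then p.2 else mx)
      else pvOuterA s t f (i + 1) mx
    else mx

-- db[0].keys() with next() dropping the first key; db = [] raises IndexError and an empty db[0]
-- raises StopIteration in Python — both excluded by Pre_ (headD/drop are the total stand-ins)
def get_repeats (db : List (List (String × String))) (seq : String) : List Int :=
  let keys := PySem.List.dedup ((db.headD []).map Prod.fst)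
  (keys.drop 1).foldl
    (fun acc STR => acc ++ [pvOuterA seq.toList STR.toList (seq.toList.length + 1) 0 0]) []

-- ===== PORT B =====
-- _longest_empty_run(parts): leading count of "" (the while loop, as takeWhile length),
-- then recurse past the first non-empty piece
def pvLongestEmptyRun : List String → Int
  | [] => 0
  | p :: ps =>
    let e := ((p :: ps).takeWhile (fun q => q == "")).length
    max (e : Int) (pvLongestEmptyRun ((p :: ps).drop (e + 1)))
termination_by parts => parts.length
decreasing_by simp

-- seq.split(STR) raises ValueError for STR = "" (split? = none there; excluded by Pre_)
def pvKeyB (seq STR : String) : Int :=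
  match PySem.Str.split? seq STR with
  | none => 0
  | some parts =>
      if parts.length == 1 then 0
      else pvLongestEmptyRun (PySem.List.slice parts (some 1) (some (-1))) + 1

def get_repeats_alt (db : List (List (String × String))) (seq : String) : List Int :=
  ((PySem.List.dedup ((db.headD []).map Prod.fst)).drop 1).map (fun STR => pvKeyB seq STR)

-- ===== PRECONDITION & SPEC =====
-- Pre_ excludes only: db = [] (A raises IndexError), an empty db[0] (A raises StopIteration),
-- and a db[0] with an empty-string STR key after the first (A loops forever on nonempty seq,
-- and on empty seq A returns 0 for that key while B's seq.split('') raises ValueError).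
def Pre_get_repeats (db : List (List (String × String))) (seq : String) : Prop :=
  db ≠ [] ∧ db.headD [] ≠ [] ∧
    ∀ STR ∈ (PySem.List.dedup ((db.headD []).map Prod.fst)).drop 1, STR ≠ ""
instance (db : List (List (String × String))) (seq : String) : Decidable (Pre_get_repeats db seq) := by
  unfold Pre_get_repeats; infer_instance

def pvWitness_get_repeats : (List (List (String × String))) × String :=
  ([[("name", "x"), ("AGAT", "y"), ("AATG", "z")]], "AGATAGATAATG")

def Spec_get_repeats (db : List (List (String × String))) (seq : String) (out : List Int) : Prop :=
  out = get_repeats_alt db seq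
instance (db : List (List (String × String))) (seq : String) (out : List Int) : Decidable (Spec_get_repeats db seq out) := by
  unfold Spec_get_repeats; infer_instance

-- ===== CLAIM (what is proved, stated in full; the proofs are below) =====
def Claim_equal_get_repeats : Prop := ∀ (db : List (List (String × String))) (seq : String),
  Dom_get_repeats db seq → Pre_get_repeats db seq → Spec_get_repeats db seq (get_repeats db seq)

-- ===== LEMMAS AND PROOFS =====

theorem pv_take_endswith (u t : List Char) :
    PySem.Chars.endswith (u.take t.length) t = t.isPrefixOf u := by
  rw [Bool.eq_iff_iff, PySem.Chars.endswith_iff, List.isPrefixOf_iff_prefix]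
  constructor
  · intro h
    have hle : t.length ≤ (u.take t.length).length := h.length_le
    have : (u.take t.length).length ≤ t.length := by simp
    have heq : t = u.take t.length := h.eq_of_length (by omega)
    rw [heq]
    exact List.take_prefix _ _
  · intro h
    have := List.prefix_iff_eq_take.mp h
    rw [← this]

theorem pv_endsAt_eq (s t : List Char) (i : Nat) :
    pvEndsAt s t i = t.isPrefixOf (s.drop i) := by
  unfold pvEndsAt
  rw [show ((t.length + i : Nat) : Int) = ((i : Nat) : Int) + ((t.length : Nat) : Int) by push_cast; ring]
  rw [PySem.List.slice_natCast_add, pv_take_endswith]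

-- the number of consecutive copies of t at position i of s (the common reference)
def pvRun (s t : List Char) (i : Nat) : Nat :=
  if h : t ≠ [] ∧ t.isPrefixOf (s.drop i) then 1 + pvRun s t (i + t.length) else 0
termination_by s.length - i
decreasing_by
  have h1 : 0 < t.length := List.length_pos_iff.mpr h.1
  have h2 : t.length ≤ (s.drop i).length := (List.isPrefixOf_iff_prefix.mp h.2).length_le
  simp at h2; omega

theorem pvRun_succ {s t : List Char} {i : Nat} (ht : t ≠ []) (hp : t.isPrefixOf (s.drop i)) :
    pvRun s t i = 1 + pvRun s t (i + t.length) := by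
  rw [pvRun]; rw [dif_pos ⟨ht, hp⟩]

theorem pvRun_zero {s t : List Char} {i : Nat} (hp : ¬ t.isPrefixOf (s.drop i)) :
    pvRun s t i = 0 := by
  rw [pvRun]; rw [dif_neg (by tauto)]

theorem pv_lt_len {s t : List Char} {i : Nat} (ht : t ≠ []) (hp : t.isPrefixOf (s.drop i)) :
    i < s.length := by
  have h1 : 0 < t.length := List.length_pos_iff.mpr ht
  have h2 : t.length ≤ (s.drop i).length := (List.isPrefixOf_iff_prefix.mp hp).length_le
  simp at h2; omega

theorem pvRun_le_aux (s t : List Char) :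
    ∀ d i, s.length - i ≤ d → pvRun s t i ≤ s.length - i := by
  intro d
  induction d with
  | zero =>
    intro i hd
    rw [pvRun]
    split
    · rename_i hc
      have := pv_lt_len hc.1 hc.2
      omega
    · omega
  | succ d ih =>
    intro i hd
    rw [pvRun]
    split
    · rename_i hc
      have h1 : 0 < t.length := List.length_pos_iff.mpr hc.1
      have h2 := pv_lt_len hc.1 hc.2
      have := ih (i + t.length) (by omega)
      omega
    · omega

theorem pvRun_le (s t : List Char) (i : Nat) : pvRun s t i ≤ s.length - i :=
  pvRun_le_aux s t s.length i (by omega)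

theorem pvRun_pos {s t : List Char} {i : Nat} (ht : t ≠ []) (hp : t.isPrefixOf (s.drop i)) :
    1 ≤ pvRun s t i := by rw [pvRun_succ ht hp]; omega

-- pvRun only depends on the dropped suffix
theorem pvRun_shift (s t : List Char) :
    ∀ d i k, s.length - (i + k) ≤ d → pvRun (s.drop i) t k = pvRun s t (i + k) := by
  intro d
  induction d with
  | zero =>
    intro i k hd
    have hdd : (s.drop i).drop k = s.drop (i + k) := by rw [List.drop_drop]
    rw [pvRun]
    conv_rhs => rw [pvRun]
    rw [hdd]
    by_cases hc : t ≠ [] ∧ t.isPrefixOf (s.drop (i + k))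
    · exfalso; have := pv_lt_len hc.1 hc.2; omega
    · rw [dif_neg hc, dif_neg hc]
  | succ d ih =>
    intro i k hd
    have hdd : (s.drop i).drop k = s.drop (i + k) := by rw [List.drop_drop]
    rw [pvRun]
    conv_rhs => rw [pvRun]
    rw [hdd]
    by_cases hc : t ≠ [] ∧ t.isPrefixOf (s.drop (i + k))
    · rw [dif_pos hc, dif_pos hc]
      have h1 : 0 < t.length := List.length_pos_iff.mpr hc.1
      have h2 := pv_lt_len hc.1 hc.2
      rw [ih i (k + t.length) (by omega), Nat.add_assoc]
    · rw [dif_neg hc, dif_neg hc]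

-- A's loop, fuel-free (well-founded on s.length - i): the reference A is reduced to
def pvGref (s t : List Char) (i : Nat) (mx : Int) : Int :=
  if hcond : t ≠ [] ∧ i < s.length then
    if hpre : t.isPrefixOf (s.drop i) then
      pvGref s t (i + t.length * pvRun s t i) (max mx (pvRun s t i))
    else pvGref s t (i + 1) mx
  else mx
termination_by s.length - i
decreasing_by
  · have h1 : 0 < t.length := List.length_pos_iff.mpr hcond.1
    have h2 : 1 ≤ pvRun s t i := pvRun_pos hcond.1 hpre
    have h3 := hcond.2
    have h4 : 0 < t.length * pvRun s t i := Nat.mul_pos h1 h2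
    omega
  · have h3 := hcond.2
    omega

theorem pv_if_lt_max (a b : Int) : (if a < b then b else a) = max a b := by
  rcases le_or_gt b a with h | h
  · rw [if_neg (not_lt.mpr h), max_eq_left h]
  · rw [if_pos h, max_eq_right h.le]

theorem pvInnerA_eq {s t : List Char} (ht : t ≠ []) :
    ∀ f i cur, pvRun s t i < f →
      pvInnerA s t f i cur = (i + t.length * pvRun s t i, cur + (pvRun s t i : Int)) := by
  intro f
  induction f with
  | zero => intro i cur h; omega
  | succ f ih =>
    intro i cur h
    unfold pvInnerA
    rw [pv_endsAt_eq]
    by_cases hp : t.isPrefixOf (s.drop i)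
    · rw [if_pos hp]
      have hr : pvRun s t i = 1 + pvRun s t (i + t.length) := pvRun_succ ht hp
      rw [ih (i + t.length) (cur + 1) (by omega)]
      refine Prod.ext ?_ ?_
      · simp only [hr]; ring_nf
      · simp only [hr]; push_cast; ring
    · rw [if_neg hp, pvRun_zero hp]; simp

theorem pvOuterA_eq {s t : List Char} (ht : t ≠ []) :
    ∀ f i mx, s.length - i < f → pvOuterA s t f i mx = pvGref s t i mx := by
  intro f
  induction f with
  | zero => intro i mx h; omega
  | succ f ih =>
    intro i mx h
    unfold pvOuterA
    by_cases hin : i < s.length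
    · rw [if_pos hin, pv_endsAt_eq]
      by_cases hp : t.isPrefixOf (s.drop i)
      · rw [if_pos hp]
        have h1 : 0 < t.length := List.length_pos_iff.mpr ht
        have hrle : pvRun s t (i + t.length) < s.length + 1 := by
          have := pvRun_le s t (i + t.length); omega
        rw [pvInnerA_eq ht _ _ _ hrle]
        have hr : pvRun s t i = 1 + pvRun s t (i + t.length) := pvRun_succ ht hp
        have hidx : i + t.length + t.length * pvRun s t (i + t.length)
            = i + t.length * pvRun s t i := by rw [hr]; ring_nf
        have hcur : ((1 : Int) + (pvRun s t (i + t.length) : Int)) = (pvRun s t i : Int) := by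
          rw [hr]; push_cast; ring
        simp only [hidx, hcur]
        have hprod : 0 < t.length * pvRun s t i := Nat.mul_pos h1 (pvRun_pos ht hp)
        rw [ih _ _ (by omega)]
        conv_rhs => rw [pvGref]
        rw [dif_pos ⟨ht, hin⟩, dif_pos hp, pv_if_lt_max]
      · rw [if_neg hp]
        rw [ih _ _ (by omega)]
        conv_rhs => rw [pvGref]
        rw [dif_pos ⟨ht, hin⟩, dif_neg hp]
    · rw [if_neg hin]
      rw [pvGref, dif_neg (fun hc => hin hc.2)]

-- B's greedy reference on the remaining suffix (Nat-valued)
def pvGF (t u : List Char) : Nat :=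
  if h : t ≠ [] ∧ u ≠ [] then
    if hp : t.isPrefixOf u then
      max (pvRun u t 0) (pvGF t (u.drop (t.length * pvRun u t 0)))
    else pvGF t (u.drop 1)
  else 0
termination_by u.length
decreasing_by
  · have h1 : 0 < t.length := List.length_pos_iff.mpr h.1
    have h2 : 1 ≤ pvRun u t 0 := pvRun_pos h.1 (by simpa using hp)
    have h3 : u ≠ [] := h.2
    have h4 : 0 < u.length := List.length_pos_iff.mpr h3
    simp; omega
  · have h4 : 0 < u.length := List.length_pos_iff.mpr h.2
    simp; omega

theorem pv_triv (s t : List Char) (i : Nat) (mx : Int) (h : ¬(t ≠ [] ∧ i < s.length))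
    (hmx : 0 ≤ mx) : pvGref s t i mx = max mx (pvGF t (s.drop i)) := by
  rw [pvGref, dif_neg h]
  have hz : pvGF t (s.drop i) = 0 := by
    rw [pvGF, dif_neg]
    intro hc
    apply h
    refine ⟨hc.1, ?_⟩
    by_contra hh
    push Not at hh
    exact hc.2 (List.drop_eq_nil_iff.mpr (by omega))
  rw [hz]
  omega

theorem pvGref_eq_GF (s t : List Char) :
    ∀ d i mx, s.length - i ≤ d → 0 ≤ mx → pvGref s t i mx = max mx (pvGF t (s.drop i)) := by
  intro d
  induction d with
  | zero =>
    intro i mx hd hmx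
    exact pv_triv s t i mx (by intro hc; omega) hmx
  | succ d ih =>
    intro i mx hd hmx
    by_cases hc : t ≠ [] ∧ i < s.length
    · obtain ⟨ht, hin⟩ := hc
      rw [pvGref, dif_pos ⟨ht, hin⟩]
      have hne : s.drop i ≠ [] := by
        intro hnil
        have := List.drop_eq_nil_iff.mp hnil
        omega
      by_cases hp : t.isPrefixOf (s.drop i)
      · rw [dif_pos hp]
        have h1 : 0 < t.length := List.length_pos_iff.mpr ht
        have hr0 : pvRun (s.drop i) t 0 = pvRun s t i := by
          have := pvRun_shift s t s.length i 0 (by omega)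
          simpa using this
        have hrpos : 1 ≤ pvRun s t i := pvRun_pos ht hp
        have hprod : 0 < t.length * pvRun s t i := Nat.mul_pos h1 hrpos
        rw [ih _ _ (by omega) (le_trans hmx (le_max_left _ _))]
        conv_rhs => rw [pvGF, dif_pos ⟨ht, hne⟩, dif_pos hp]
        rw [hr0]
        have hdd : (s.drop i).drop (t.length * pvRun s t i)
            = s.drop (i + t.length * pvRun s t i) := by rw [List.drop_drop]
        rw [hdd]
        push_cast
        rw [max_assoc]
      · rw [dif_neg hp]
        rw [ih _ _ (by omega) hmx]
        conv_rhs => rw [pvGF, dif_pos ⟨ht, hne⟩, dif_neg hp]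
        have hdd : (s.drop i).drop 1 = s.drop (i + 1) := by rw [List.drop_drop]
        rw [hdd]
    · exact pv_triv s t i mx hc hmx

theorem pvGF_nomatch (t : List Char) (ht : t ≠ []) :
    ∀ d u, u.length ≤ d → ¬ t <:+: u → pvGF t u = 0 := by
  intro d
  induction d with
  | zero =>
    intro u hd h
    have : u = [] := List.length_eq_zero_iff.mp (by omega)
    subst this
    rw [pvGF, dif_neg (by simp)]
  | succ d ih =>
    intro u hd h
    cases u with
    | nil => rw [pvGF, dif_neg (by simp)]
    | cons c rest =>
      have hp : ¬ t.isPrefixOf (c :: rest) := by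
        intro hp
        exact h (List.isPrefixOf_iff_prefix.mp hp).isInfix
      rw [pvGF, dif_pos ⟨ht, by simp⟩, dif_neg hp]
      simp only [List.drop_succ_cons, List.drop_zero]
      apply ih rest (by simp at hd; omega)
      intro hinf
      exact h (List.infix_cons_iff.mpr (Or.inr hinf))

theorem pvGF_pos (t : List Char) (ht : t ≠ []) :
    ∀ d u, u.length ≤ d → t <:+: u → 1 ≤ pvGF t u := by
  intro d
  induction d with
  | zero =>
    intro u hd hinf
    exfalso
    have h1 := hinf.length_le
    have h2 : 0 < t.length := List.length_pos_iff.mpr ht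
    omega
  | succ d ih =>
    intro u hd hinf
    cases u with
    | nil => exact absurd (List.infix_nil.mp hinf) ht
    | cons c rest =>
      rw [pvGF, dif_pos ⟨ht, by simp⟩]
      by_cases hp : t.isPrefixOf (c :: rest)
      · rw [dif_pos hp]
        have : 1 ≤ pvRun (c :: rest) t 0 := pvRun_pos ht (by simpa using hp)
        exact le_trans this (le_max_left _ _)
      · rw [dif_neg hp]
        simp only [List.drop_succ_cons, List.drop_zero]
        apply ih rest (by simp at hd; omega)
        rcases List.infix_cons_iff.mp hinf with h | h
        · exact absurd (List.isPrefixOf_iff_prefix.mpr h) hp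
        · exact h

theorem pvGF_walk (t : List Char) (ht : t ≠ []) :
    ∀ j u, (∀ i < j, ¬ t.isPrefixOf (u.drop i)) → pvGF t u = pvGF t (u.drop j) := by
  intro j
  induction j with
  | zero => intro u _; simp
  | succ j ih =>
    intro u h
    cases u with
    | nil => simp
    | cons c rest =>
      have h0 : ¬ t.isPrefixOf (c :: rest) := by
        have := h 0 (by omega)
        simpa using this
      rw [pvGF, dif_pos ⟨ht, by simp⟩, dif_neg h0]
      simp only [List.drop_succ_cons, List.drop_zero]
      exact ih rest (fun i hi => by
        have := h (i + 1) (by omega)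
        simpa using this)

-- the piece list produced by Python's seq.split(STR): cut at the first occurrence, repeat
def pvPieces (t u : List Char) : List (List Char) :=
  if h : t ≠ [] ∧ PySem.Chars.isIn t u then
    u.take (PySem.Chars.find u t).toNat
      :: pvPieces t (u.drop ((PySem.Chars.find u t).toNat + t.length))
  else [u]
termination_by u.length
decreasing_by
  have h1 : 0 < t.length := List.length_pos_iff.mpr h.1
  have h2 : t <:+: u := (PySem.Chars.isIn_iff_infix t u).mp h.2
  have h3 : 0 < u.length := by
    have := h2.length_le
    have := List.length_pos_iff.mpr h.1
    omega
  simp; omega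

theorem pvPieces_ne_nil (t u : List Char) : pvPieces t u ≠ [] := by
  rw [pvPieces]; split <;> simp

theorem pv_find_eq_of (u t : List Char) (j : Nat) (h1 : t.isPrefixOf (u.drop j))
    (h2 : ∀ i < j, ¬ t.isPrefixOf (u.drop i)) : PySem.Chars.find u t = (j : Int) := by
  have hinf : t <:+: u :=
    (List.isPrefixOf_iff_prefix.mp h1).isInfix.trans (List.drop_suffix j u).isInfix
  have hnn : 0 ≤ PySem.Chars.find u t := (PySem.Chars.find_nonneg_iff u t).mpr hinf
  obtain ⟨hpf, hmin⟩ := PySem.Chars.find_spec hnn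
  have hkj : (PySem.Chars.find u t).toNat = j := by
    rcases lt_trichotomy (PySem.Chars.find u t).toNat j with h | h | h
    · exact absurd (List.isPrefixOf_iff_prefix.mpr hpf) (h2 _ h)
    · exact h
    · exact absurd (List.isPrefixOf_iff_prefix.mp h1) (hmin j h)
  omega

theorem pvPieces_nomatch {t u : List Char} (h : ¬ t <:+: u) : pvPieces t u = [u] := by
  rw [pvPieces, dif_neg]
  intro hc
  exact h ((PySem.Chars.isIn_iff_infix t u).mp hc.2)

theorem pvPieces_prefix {t u : List Char} (ht : t ≠ []) (hp : t.isPrefixOf u) :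
    pvPieces t u = [] :: pvPieces t (u.drop t.length) := by
  have hinf : t <:+: u := (List.isPrefixOf_iff_prefix.mp hp).isInfix
  have hf : PySem.Chars.find u t = ((0 : Nat) : Int) :=
    pv_find_eq_of u t 0 (by simpa using hp) (fun i hi => absurd hi (Nat.not_lt_zero i))
  rw [pvPieces, dif_pos ⟨ht, (PySem.Chars.isIn_iff_infix t u).mpr hinf⟩, hf]
  simp

theorem pvPieces_cons {t : List Char} (ht : t ≠ []) {c : Char} {rest : List Char}
    (hnp : ¬ t.isPrefixOf (c :: rest)) :
    pvPieces t (c :: rest) = (pvPieces t rest).modifyHead (fun x => c :: x) := by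
  by_cases hinf : t <:+: rest
  · have hnn : 0 ≤ PySem.Chars.find rest t := (PySem.Chars.find_nonneg_iff rest t).mpr hinf
    obtain ⟨hpf, hmin⟩ := PySem.Chars.find_spec hnn
    set j' := (PySem.Chars.find rest t).toNat with hj'
    have hfc : PySem.Chars.find (c :: rest) t = ((j' + 1 : Nat) : Int) := by
      apply pv_find_eq_of
      · simpa using List.isPrefixOf_iff_prefix.mpr hpf
      · intro i hi
        cases i with
        | zero => simpa using hnp
        | succ i =>
          simp only [List.drop_succ_cons]
          intro hb
          exact hmin i (by omega) (List.isPrefixOf_iff_prefix.mp hb)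
    have hfr : PySem.Chars.find rest t = ((j' : Nat) : Int) := by omega
    rw [pvPieces, dif_pos ⟨ht, (PySem.Chars.isIn_iff_infix t (c :: rest)).mpr
        (List.infix_cons_iff.mpr (Or.inr hinf))⟩, hfc]
    conv_rhs => rw [pvPieces, dif_pos ⟨ht, (PySem.Chars.isIn_iff_infix t rest).mpr hinf⟩, hfr]
    simp only [Int.toNat_natCast, List.take_succ_cons, List.modifyHead]
    have : j' + 1 + t.length = (j' + t.length) + 1 := by omega
    rw [this, List.drop_succ_cons]
  · have hninf : ¬ t <:+: (c :: rest) := by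
      rw [List.infix_cons_iff]
      push Not
      exact ⟨fun h => hnp (List.isPrefixOf_iff_prefix.mpr h), hinf⟩
    rw [pvPieces_nomatch hninf, pvPieces_nomatch hinf]
    simp [List.modifyHead]

theorem pvPieces_front (t : List Char) (ht : t ≠ []) :
    ∀ d u, u.length ≤ d →
      pvPieces t u = List.replicate (pvRun u t 0) [] ++ pvPieces t (u.drop (t.length * pvRun u t 0)) := by
  intro d
  induction d with
  | zero =>
    intro u hd
    have : u = [] := List.length_eq_zero_iff.mp (by omega)
    subst this
    have hp : ¬ t.isPrefixOf (([] : List Char).drop 0) := by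
      simpa [List.isPrefixOf_iff_prefix] using ht
    rw [pvRun_zero hp]
    simp
  | succ d ih =>
    intro u hd
    have h1 : 0 < t.length := List.length_pos_iff.mpr ht
    by_cases hp : t.isPrefixOf (u.drop 0)
    · have hple : t.length ≤ u.length := by
        have := (List.isPrefixOf_iff_prefix.mp hp).length_le
        simpa using this
      have hr : pvRun u t 0 = 1 + pvRun u t t.length := by
        have := pvRun_succ ht hp
        simpa using this
      have hshift : pvRun (u.drop t.length) t 0 = pvRun u t t.length := by
        have := pvRun_shift u t u.length t.length 0 (by omega)
        simpa using this
      rw [pvPieces_prefix ht (by simpa using hp)]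
      rw [ih (u.drop t.length) (by simp; omega), hshift, List.drop_drop]
      have hr' : pvRun u t 0 = pvRun u t t.length + 1 := by omega
      rw [hr', List.replicate_succ, Nat.mul_succ]
      simp [Nat.add_comm]
    · rw [pvRun_zero hp]
      simp

theorem pv_modifyHead_nil {α : Type} (l : List (List α)) :
    l.modifyHead (fun x => ([] : List α) ++ x) = l := by
  cases l <;> simp

theorem pv_go_nil (t : List Char) (f : Nat) (cur : List Char) (acc : List (List Char)) :
    PySem.Chars.splitOn.go t (f + 1) [] cur acc = (cur.reverse :: acc).reverse := by
  rw [PySem.Chars.splitOn.go]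
  exact (by omega : ¬ (f + 1 = 0))

theorem pv_go_cons (t : List Char) (f : Nat) (c : Char) (rest cur : List Char)
    (acc : List (List Char)) :
    PySem.Chars.splitOn.go t (f + 1) (c :: rest) cur acc
      = (if t.isPrefixOf (c :: rest)
          then PySem.Chars.splitOn.go t f (List.drop t.length (c :: rest)) [] (cur.reverse :: acc)
          else PySem.Chars.splitOn.go t f rest (c :: cur) acc) := by
  rw [PySem.Chars.splitOn.go]

theorem pv_go_eq {t : List Char} (ht : t ≠ []) :
    ∀ fuel l cur acc, l.length < fuel →
      PySem.Chars.splitOn.go t fuel l cur acc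
        = acc.reverse ++ (pvPieces t l).modifyHead (fun x => cur.reverse ++ x) := by
  intro fuel
  induction fuel with
  | zero => intro l cur acc h; omega
  | succ f ih =>
    intro l cur acc h
    cases l with
    | nil =>
      rw [pv_go_nil, pvPieces_nomatch (fun hinf => ht (List.infix_nil.mp hinf))]
      simp [List.modifyHead]
    | cons c rest =>
      have h1 : 0 < t.length := List.length_pos_iff.mpr ht
      by_cases hp : t.isPrefixOf (c :: rest)
      · rw [pv_go_cons, if_pos hp]
        have hlen : ((c :: rest).drop t.length).length < f := by
          simp at h ⊢; omega
        rw [ih _ _ _ hlen, pvPieces_prefix ht hp]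
        simp only [List.reverse_nil]
        rw [pv_modifyHead_nil]
        simp [List.modifyHead]
      · rw [pv_go_cons, if_neg hp]
        have hlen : rest.length < f := by simp at h; omega
        rw [ih _ _ _ hlen, pvPieces_cons ht hp, List.modifyHead_modifyHead]
        congr 1
        congr 1
        funext x
        simp

theorem pv_splitOn_eq {t u : List Char} (ht : t ≠ []) :
    PySem.Chars.splitOn u t = pvPieces t u := by
  unfold PySem.Chars.splitOn
  rw [pv_go_eq ht _ _ _ _ (by omega)]
  simp only [List.reverse_nil, List.nil_append]
  exact pv_modifyHead_nil _

theorem pvLER_cons (p : String) (ps : List String) :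
    pvLongestEmptyRun (p :: ps)
      = max ((((p :: ps).takeWhile (fun q => q == "")).length : Int))
          (pvLongestEmptyRun ((p :: ps).drop (((p :: ps).takeWhile (fun q => q == "")).length + 1))) := by
  rw [pvLongestEmptyRun]

theorem pv_takeWhile_rep_all (m : Nat) :
    List.takeWhile (fun q => q == "") (List.replicate m "") = List.replicate m ("" : String) := by
  induction m with
  | zero => simp
  | succ n ih => rw [List.replicate_succ, List.takeWhile_cons_of_pos (by simp), ih]

theorem pv_takeWhile_rep (m : Nat) (q : String) (xs : List String) (hq : q ≠ "") :
    List.takeWhile (fun p => p == "") (List.replicate m "" ++ q :: xs)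
      = List.replicate m ("" : String) := by
  induction m with
  | zero => simp [List.takeWhile_cons_of_neg, hq]
  | succ n ih =>
    rw [List.replicate_succ, List.cons_append, List.takeWhile_cons_of_pos (by simp), ih]

theorem pv_drop_rep (m : Nat) (q : String) (xs : List String) :
    List.drop (m + 1) (List.replicate m "" ++ q :: xs) = xs := by
  induction m with
  | zero => simp
  | succ n ih =>
    rw [List.replicate_succ, List.cons_append, show n + 1 + 1 = (n + 1) + 1 from rfl,
      List.drop_succ_cons, ih]

theorem pvLER_replicate (m : Nat) : pvLongestEmptyRun (List.replicate m "") = (m : Int) := by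
  cases m with
  | zero => simp [pvLongestEmptyRun]
  | succ n =>
    rw [List.replicate_succ, pvLER_cons, ← List.replicate_succ, pv_takeWhile_rep_all,
      List.length_replicate, List.drop_eq_nil_of_le (by simp)]
    rw [show pvLongestEmptyRun [] = 0 by rw [pvLongestEmptyRun]]
    omega

theorem pvLER_rep_cons (m : Nat) (q : String) (xs : List String) (hq : q ≠ "") :
    pvLongestEmptyRun (List.replicate m "" ++ q :: xs) = max (m : Int) (pvLongestEmptyRun xs) := by
  cases m with
  | zero =>
    simp only [List.replicate_zero, List.nil_append]
    rw [pvLER_cons, List.takeWhile_cons_of_neg (by simp [hq])]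
    simp
  | succ n =>
    rw [List.replicate_succ, List.cons_append, pvLER_cons, ← List.cons_append,
      ← List.replicate_succ, pv_takeWhile_rep _ _ _ hq, List.length_replicate, pv_drop_rep]

theorem pv_slice_one_negone (xs : List String) :
    PySem.List.slice xs (some 1) (some (-1)) = xs.tail.dropLast := by
  cases xs with
  | nil => rfl
  | cons x l =>
    simp [PySem.List.slice, PySem.List.clampIdx, List.dropLast_eq_take]
    split <;> omega

-- beyond the counted run there is no further copy
theorem pvRun_after (s t : List Char) :
    ∀ d i, s.length - i ≤ d → pvRun s t (i + t.length * pvRun s t i) = 0 := by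
  intro d
  induction d with
  | zero =>
    intro i hd
    by_cases hc : t ≠ [] ∧ t.isPrefixOf (s.drop i)
    · exfalso; have := pv_lt_len hc.1 hc.2; omega
    · have h0 : pvRun s t i = 0 := by rw [pvRun, dif_neg hc]
      rw [h0, Nat.mul_zero, Nat.add_zero, h0]
  | succ d ih =>
    intro i hd
    by_cases hc : t ≠ [] ∧ t.isPrefixOf (s.drop i)
    · have h1 : 0 < t.length := List.length_pos_iff.mpr hc.1
      have h2 := pv_lt_len hc.1 hc.2
      have hr : pvRun s t i = 1 + pvRun s t (i + t.length) := pvRun_succ hc.1 hc.2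
      have harith : i + t.length * pvRun s t i
          = (i + t.length) + t.length * pvRun s t (i + t.length) := by
        rw [hr, Nat.mul_add, Nat.mul_one]; ring
      rw [harith]
      exact ih (i + t.length) (by omega)
    · have h0 : pvRun s t i = 0 := by rw [pvRun, dif_neg hc]
      rw [h0, Nat.mul_zero, Nat.add_zero, h0]

theorem pv_ofList_ne_empty {l : List Char} (h : l ≠ []) : String.ofList l ≠ "" := by
  intro hc
  apply h
  have : (String.ofList l).toList = ("" : String).toList := by rw [hc]
  simpa using this

theorem pv_main_eq {t : List Char} (ht : t ≠ []) :
    ∀ d u, u.length ≤ d → t <:+: u →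
      (pvGF t u : Int)
        = pvLongestEmptyRun (((pvPieces t u).tail.dropLast).map String.ofList) + 1 := by
  intro d
  induction d with
  | zero =>
    intro u hd hinf
    have : u = [] := List.length_eq_zero_iff.mp (by omega)
    subst this
    exact absurd (List.infix_nil.mp hinf) ht
  | succ d ih =>
    intro u hd hinf
    have h1 : 0 < t.length := List.length_pos_iff.mpr ht
    have hnn : 0 ≤ PySem.Chars.find u t := (PySem.Chars.find_nonneg_iff u t).mpr hinf
    obtain ⟨hpf, hmin⟩ := PySem.Chars.find_spec hnn
    set j := (PySem.Chars.find u t).toNat with hjdef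
    set v := u.drop j with hvdef
    have hpv : t.isPrefixOf v := List.isPrefixOf_iff_prefix.mpr hpf
    set r := pvRun v t 0 with hrdef
    have hrpos : 1 ≤ r := pvRun_pos ht (by simpa using hpv)
    have hlr : 0 < t.length * r := Nat.mul_pos h1 hrpos
    have hvne : v ≠ [] := by
      intro hc
      rw [hc] at hpv
      exact ht (List.prefix_nil.mp (List.isPrefixOf_iff_prefix.mp hpv))
    set w := v.drop (t.length * r) with hwdef
    have hGF : pvGF t u = max r (pvGF t w) := by
      rw [pvGF_walk t ht j u (fun i hi hb => hmin i hi (List.isPrefixOf_iff_prefix.mp hb))]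
      rw [← hvdef, pvGF, dif_pos ⟨ht, hvne⟩, dif_pos hpv, ← hrdef, ← hwdef]
    have hnpw : ¬ t.isPrefixOf w := by
      intro hb
      have hsh : pvRun (v.drop (t.length * r)) t 0 = pvRun v t (t.length * r + 0) :=
        pvRun_shift v t v.length (t.length * r) 0 (Nat.sub_le _ _)
      have hafter : pvRun v t (0 + t.length * pvRun v t 0) = 0 :=
        pvRun_after v t v.length 0 (by omega)
      rw [← hrdef] at hafter
      simp only [Nat.zero_add, Nat.add_zero] at hsh hafter
      have hpos : 1 ≤ pvRun (v.drop (t.length * r)) t 0 := pvRun_pos ht (by simpa [hwdef] using hb)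
      omega
    have hpieces : pvPieces t u = u.take j :: (List.replicate (r - 1) [] ++ pvPieces t w) := by
      rw [pvPieces, dif_pos ⟨ht, (PySem.Chars.isIn_iff_infix t u).mpr hinf⟩, ← hjdef]
      congr 1
      have hdd : u.drop (j + t.length) = v.drop t.length := by
        rw [hvdef, List.drop_drop]
      rw [hdd, pvPieces_front t ht (v.drop t.length).length _ le_rfl]
      have hsh2 : pvRun (v.drop t.length) t 0 = pvRun v t (t.length + 0) :=
        pvRun_shift v t v.length t.length 0 (Nat.sub_le _ _)
      rw [Nat.add_zero] at hsh2
      have hr1 : pvRun v t t.length = r - 1 := by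
        have hstep := pvRun_succ ht (show t.isPrefixOf (v.drop 0) by simpa using hpv)
        simp only [Nat.zero_add] at hstep
        omega
      rw [hsh2, hr1]
      congr 1
      rw [List.drop_drop, ← hwdef.symm]
      congr 1
      have hrr : r = (r - 1) + 1 := by omega
      conv_rhs => rw [hrr]
      rw [Nat.mul_succ, Nat.add_comm]
    by_cases hiw : t <:+: w
    · obtain ⟨m, hm, hmpos⟩ : ∃ m, t.length * r = m ∧ 0 < m := ⟨_, rfl, hlr⟩
      have hwlen : w.length ≤ d := by
        have h2 : w.length = v.length - (t.length * r) := by simp [hwdef]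
        have h3 : v.length = u.length - j := by simp [hvdef]
        have hjlen : j < u.length := by
          have hvl : t.length ≤ v.length := by
            have := (List.isPrefixOf_iff_prefix.mp hpv).length_le
            omega
          have : v.length = u.length - j := by simp [hvdef]
          omega
        rw [hm] at h2
        omega
      have ihw := ih w hwlen hiw
      have hnnw : 0 ≤ PySem.Chars.find w t := (PySem.Chars.find_nonneg_iff w t).mpr hiw
      obtain ⟨hpfw, hminw⟩ := PySem.Chars.find_spec hnnw
      have hfwpos : 0 < (PySem.Chars.find w t).toNat := by
        rcases Nat.eq_zero_or_pos (PySem.Chars.find w t).toNat with h0 | h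
        · exfalso
          apply hnpw
          apply List.isPrefixOf_iff_prefix.mpr
          simpa [h0] using hpfw
        · exact h
      have hwne : w ≠ [] := fun hc => ht (List.infix_nil.mp (hc ▸ hiw))
      have hwpieces : pvPieces t w
          = w.take (PySem.Chars.find w t).toNat
            :: pvPieces t (w.drop ((PySem.Chars.find w t).toNat + t.length)) := by
        rw [pvPieces, dif_pos ⟨ht, (PySem.Chars.isIn_iff_infix t w).mpr hiw⟩]
      set q := w.take (PySem.Chars.find w t).toNat with hqdef
      set rest' := pvPieces t (w.drop ((PySem.Chars.find w t).toNat + t.length)) with hrest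
      have hqne : q ≠ [] := by
        rw [hqdef]
        intro hc
        rcases List.take_eq_nil_iff.mp hc with h | h
        · omega
        · exact hwne h
      have hrne : rest' ≠ [] := pvPieces_ne_nil _ _
      rw [hpieces, List.tail_cons, hwpieces]
      rw [List.dropLast_append_of_ne_nil (by simp : q :: rest' ≠ [])]
      rw [List.dropLast_cons_of_ne_nil hrne]
      rw [List.map_append, List.map_replicate, List.map_cons]
      rw [show String.ofList ([] : List Char) = "" from rfl]
      rw [pvLER_rep_cons (r - 1) _ _ (pv_ofList_ne_empty hqne)]
      have ihw' : pvLongestEmptyRun (List.map String.ofList rest'.dropLast)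
          = (pvGF t w : Int) - 1 := by
        rw [hwpieces] at ihw
        simp only [List.tail_cons] at ihw
        omega
      rw [ihw']
      have hgfw : 1 ≤ pvGF t w := pvGF_pos t ht w.length w le_rfl hiw
      rw [hGF]
      push_cast [Nat.cast_sub hrpos]
      omega
    · have hGFw : pvGF t w = 0 := pvGF_nomatch t ht w.length w le_rfl hiw
      rw [pvPieces_nomatch hiw] at hpieces
      rw [hpieces, List.tail_cons, List.dropLast_concat, List.map_replicate]
      rw [show String.ofList ([] : List Char) = "" from rfl, pvLER_replicate]
      rw [hGF, hGFw]
      push_cast [Nat.cast_sub hrpos]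
      omega

theorem pv_key_eq (seq STR : String) (hSTR : STR ≠ "") :
    pvOuterA seq.toList STR.toList (seq.toList.length + 1) 0 0 = pvKeyB seq STR := by
  have ht : STR.toList ≠ [] := by
    intro hl
    apply hSTR
    have : STR.toList = ("" : String).toList := by simpa using hl
    exact String.toList_inj.mp this
  rw [pvOuterA_eq ht _ _ _ (by omega),
    pvGref_eq_GF seq.toList STR.toList seq.toList.length 0 0 (by omega) le_rfl]
  simp only [List.drop_zero]
  rw [max_eq_right (Int.natCast_nonneg _)]
  have hsplit : PySem.Str.split? seq STR
      = some ((pvPieces STR.toList seq.toList).map String.ofList) := by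
    unfold PySem.Str.split? PySem.Chars.split?
    rw [if_neg (by simpa using ht), pv_splitOn_eq ht]
    rfl
  have hbody : pvKeyB seq STR =
      (if (((pvPieces STR.toList seq.toList).map String.ofList).length == 1) = true then 0
       else pvLongestEmptyRun (PySem.List.slice
          ((pvPieces STR.toList seq.toList).map String.ofList) (some 1) (some (-1))) + 1) := by
    unfold pvKeyB
    rw [hsplit]
  rw [hbody]
  by_cases hiw : STR.toList <:+: seq.toList
  · have hlen2 : 1 < (pvPieces STR.toList seq.toList).length := by
      rw [pvPieces, dif_pos ⟨ht, (PySem.Chars.isIn_iff_infix _ _).mpr hiw⟩]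
      have hne := pvPieces_ne_nil STR.toList
        (seq.toList.drop ((PySem.Chars.find seq.toList STR.toList).toNat + STR.toList.length))
      simp only [List.length_cons]
      have := List.length_pos_iff.mpr hne
      omega
    rw [if_neg (by simp only [List.length_map, beq_iff_eq]; omega)]
    rw [pv_slice_one_negone, ← List.map_tail, ← List.map_dropLast]
    rw [pv_main_eq ht seq.toList.length seq.toList le_rfl hiw]
  · rw [pvPieces_nomatch hiw]
    rw [if_pos (by simp)]
    rw [pvGF_nomatch STR.toList ht seq.toList.length seq.toList le_rfl hiw]
    simp

-- ===== VERDICT (by name: the statement is the Claim_ definition above) =====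
theorem get_repeats_spec : Claim_equal_get_repeats := by
  intro db seq _hdom hpre
  unfold Spec_get_repeats get_repeats get_repeats_alt
  rw [PySem.List.foldl_append_singleton_eq_map, List.nil_append]
  apply List.map_congr_left
  intro STR hmem
  exact pv_key_eq seq STR (hpre.2.2 STR hmem)
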